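-- pv_equiv track=rewrite | github.com/Paulndambo/INSURANCE-SAAS-APP | apps/sales/family_member_upload_methods/family_members_constants.py | get_relationship_types
-- ===== SOURCE A (Python) =====
-- child_types = ['Son', 'Daughter', 'Child']
--
-- parent_in_law_types = ['Parent In-Law', 'Parent in law']
--
-- mother_in_law_types = ['Mother in law', 'mother_in_law', 'Mother-in-law', 'Mother-In-Law', 'Mother_In_Law', 'Mother In-Law']
--
-- father_in_law_types = ['Father in law', 'father_in_law', 'Father-in-law', 'Father-In-Law', 'Father_In_Law', 'Father In-Law']
--
-- sibling_in_laws_types = ['Sibling In-Law', 'Sibling in law']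
--
-- sister_in_law_types = ['Sister in law', 'Sister In-Law', 'Sister_in_law', 'Sister-in-law']
--
-- brother_in_law_types = ['Brother in law', 'Brother In-Law', 'Brother_in_law', 'Brother-in-law']
--
-- son_in_law_types = ['Son in law', 'Son In-Law', 'Son-in-law', 'Son_in_law']
--
-- daughter_in_law_types = ['Daughter in law', 'Daughter In-Law', 'Daughter-in-law', 'Daughter_in_law']
--
-- adult_child_types = ["Adult Child", "Adult-Child", "Adult_child"]
--
-- minor_child_types = ["Minor Child", "Minor-Child", "Minor_child"]
--
-- grandparent_types = ['Grandparent', 'Grandfather', 'Grandmother']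
--
-- grandchildren_types = ['Grandchild', 'Granddaughter', 'Grandson']
--
-- spouse_types = ['Spouse', 'Partner', 'Wife', 'Husband']
--
-- father_types = ['Father', 'Step father', 'Step-Father']
--
-- mother_types = ['Mother', 'Step Mother', 'Step-Mother']
--
-- def get_relationship_types(relationship: str):
--     relationship_result = ''
--     if relationship.lower() in [x.lower() for x in child_types]:
--         relationship_result = 'child'
--     elif relationship.lower() in [x.lower() for x in spouse_types]:
--         relationship_result = 'spouse'
--     elif relationship.lower() in [x.lower() for x in father_types]:
--         relationship_result = 'father'
--     elif relationship.lower() in [x.lower() for x in mother_types]: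
--         relationship_result = 'mother'
--     elif relationship.lower() in [x.lower() for x in grandparent_types]:
--         relationship_result = 'grandparent'
--     elif relationship.lower() in [x.lower() for x in grandchildren_types]:
--         relationship_result = 'grandchild'
--     elif relationship.lower() in [x.lower() for x in mother_in_law_types]:
--         relationship_result = 'mother_in_law'
--     elif relationship.lower() in [x.lower() for x in father_in_law_types]:
--         relationship_result = 'father_in_law'
--     elif relationship.lower() in [x.lower() for x in sister_in_law_types]:
--         relationship_result = 'sister_in_law'
--     elif relationship.lower() in [x.lower() for x in brother_in_law_types]:
--         relationship_result = 'brother_in_law'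
--     elif relationship.lower() in [x.lower() for x in son_in_law_types]:
--         relationship_result = 'son_in_law'
--     elif relationship.lower() in [x.lower() for x in daughter_in_law_types]:
--         relationship_result = 'daughter_in_law'
--     elif relationship.lower() in [x.lower() for x in parent_in_law_types]:
--         relationship_result = 'parent_in_law'
--     elif relationship.lower() in [x.lower() for x in sibling_in_laws_types]:
--         relationship_result = 'sibling_in_law'
--     elif relationship.lower() in [x.lower() for x in adult_child_types]:
--         relationship_result = 'adult_child'
--     elif relationship.lower() in [x.lower() for x in minor_child_types]:
--         relationship_result = 'minor_child'
--     else: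
--         relationship_result = relationship.lower()
--
--     return relationship_result
-- ===== SOURCE B (Python) =====
-- child_types = ['Son', 'Daughter', 'Child']
-- parent_in_law_types = ['Parent In-Law', 'Parent in law']
-- mother_in_law_types = ['Mother in law', 'mother_in_law', 'Mother-in-law', 'Mother-In-Law', 'Mother_In_Law', 'Mother In-Law']
-- father_in_law_types = ['Father in law', 'father_in_law', 'Father-in-law', 'Father-In-Law', 'Father_In_Law', 'Father In-Law']
-- sibling_in_laws_types = ['Sibling In-Law', 'Sibling in law']
-- sister_in_law_types = ['Sister in law', 'Sister In-Law', 'Sister_in_law', 'Sister-in-law']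
-- brother_in_law_types = ['Brother in law', 'Brother In-Law', 'Brother_in_law', 'Brother-in-law']
-- son_in_law_types = ['Son in law', 'Son In-Law', 'Son-in-law', 'Son_in_law']
-- daughter_in_law_types = ['Daughter in law', 'Daughter In-Law', 'Daughter-in-law', 'Daughter_in_law']
-- adult_child_types = ["Adult Child", "Adult-Child", "Adult_child"]
-- minor_child_types = ["Minor Child", "Minor-Child", "Minor_child"]
-- grandparent_types = ['Grandparent', 'Grandfather', 'Grandmother']
-- grandchildren_types = ['Grandchild', 'Granddaughter', 'Grandson']
-- spouse_types = ['Spouse', 'Partner', 'Wife', 'Husband']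
-- father_types = ['Father', 'Step father', 'Step-Father']
-- mother_types = ['Mother', 'Step Mother', 'Step-Mother']
--
-- _category_pairs = [
--     (child_types, 'child'),
--     (spouse_types, 'spouse'),
--     (father_types, 'father'),
--     (mother_types, 'mother'),
--     (grandparent_types, 'grandparent'),
--     (grandchildren_types, 'grandchild'),
--     (mother_in_law_types, 'mother_in_law'),
--     (father_in_law_types, 'father_in_law'),
--     (sister_in_law_types, 'sister_in_law'),
--     (brother_in_law_types, 'brother_in_law'),
--     (son_in_law_types, 'son_in_law'),
--     (daughter_in_law_types, 'daughter_in_law'),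
--     (parent_in_law_types, 'parent_in_law'),
--     (sibling_in_laws_types, 'sibling_in_law'),
--     (adult_child_types, 'adult_child'),
--     (minor_child_types, 'minor_child'),
-- ]
--
-- RELATIONSHIP_MAP = {variant.lower(): label
--                     for variants, label in _category_pairs
--                     for variant in variants}
--
-- def get_relationship_types(relationship: str):
--     key = relationship.lower()
--     return RELATIONSHIP_MAP.get(key, key)
-- ===== Notes on version B (the rewrite author's own statement) =====
-- stated objective: faster
-- what changed: Replaced the 16-branch elif chain (each branch lowercasing a whole variant list and scanning it) with a single precomputed dict mapping every lowercased variant to its category; the function body is one hash lookup with relationship.lower() as the default.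
import Mathlib
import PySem

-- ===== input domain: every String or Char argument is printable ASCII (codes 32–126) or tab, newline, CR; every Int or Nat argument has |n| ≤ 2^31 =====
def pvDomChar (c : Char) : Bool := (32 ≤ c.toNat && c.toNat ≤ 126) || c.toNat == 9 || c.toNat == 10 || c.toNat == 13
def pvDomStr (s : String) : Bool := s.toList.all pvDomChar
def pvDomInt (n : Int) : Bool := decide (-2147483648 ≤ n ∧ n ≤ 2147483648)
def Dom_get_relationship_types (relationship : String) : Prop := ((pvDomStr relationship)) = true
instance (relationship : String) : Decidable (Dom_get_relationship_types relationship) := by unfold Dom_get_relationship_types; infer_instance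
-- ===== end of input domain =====

-- B replaces A's 16-branch elif chain over lowercased variant lists by one precomputed
-- lowercased-variant → category dictionary and a single lookup (objective: faster per call).

-- shared module constants
def child_types : List String := ["Son", "Daughter", "Child"]
def parent_in_law_types : List String := ["Parent In-Law", "Parent in law"]
def mother_in_law_types : List String := ["Mother in law", "mother_in_law", "Mother-in-law", "Mother-In-Law", "Mother_In_Law", "Mother In-Law"]
def father_in_law_types : List String := ["Father in law", "father_in_law", "Father-in-law", "Father-In-Law", "Father_In_Law", "Father In-Law"]
def sibling_in_laws_types : List String := ["Sibling In-Law", "Sibling in law"]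
def sister_in_law_types : List String := ["Sister in law", "Sister In-Law", "Sister_in_law", "Sister-in-law"]
def brother_in_law_types : List String := ["Brother in law", "Brother In-Law", "Brother_in_law", "Brother-in-law"]
def son_in_law_types : List String := ["Son in law", "Son In-Law", "Son-in-law", "Son_in_law"]
def daughter_in_law_types : List String := ["Daughter in law", "Daughter In-Law", "Daughter-in-law", "Daughter_in_law"]
def adult_child_types : List String := ["Adult Child", "Adult-Child", "Adult_child"]
def minor_child_types : List String := ["Minor Child", "Minor-Child", "Minor_child"]
def grandparent_types : List String := ["Grandparent", "Grandfather", "Grandmother"]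
def grandchildren_types : List String := ["Grandchild", "Granddaughter", "Grandson"]
def spouse_types : List String := ["Spouse", "Partner", "Wife", "Husband"]
def father_types : List String := ["Father", "Step father", "Step-Father"]
def mother_types : List String := ["Mother", "Step Mother", "Step-Mother"]

-- ===== PORT A =====
def get_relationship_types (relationship : String) : String :=
  if (child_types.map PySem.Str.lower).contains (PySem.Str.lower relationship) then "child"
  else if (spouse_types.map PySem.Str.lower).contains (PySem.Str.lower relationship) then "spouse"
  else if (father_types.map PySem.Str.lower).contains (PySem.Str.lower relationship) then "father"
  else if (mother_types.map PySem.Str.lower).contains (PySem.Str.lower relationship) then "mother"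
  else if (grandparent_types.map PySem.Str.lower).contains (PySem.Str.lower relationship) then "grandparent"
  else if (grandchildren_types.map PySem.Str.lower).contains (PySem.Str.lower relationship) then "grandchild"
  else if (mother_in_law_types.map PySem.Str.lower).contains (PySem.Str.lower relationship) then "mother_in_law"
  else if (father_in_law_types.map PySem.Str.lower).contains (PySem.Str.lower relationship) then "father_in_law"
  else if (sister_in_law_types.map PySem.Str.lower).contains (PySem.Str.lower relationship) then "sister_in_law"
  else if (brother_in_law_types.map PySem.Str.lower).contains (PySem.Str.lower relationship) then "brother_in_law"
  else if (son_in_law_types.map PySem.Str.lower).contains (PySem.Str.lower relationship) then "son_in_law"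
  else if (daughter_in_law_types.map PySem.Str.lower).contains (PySem.Str.lower relationship) then "daughter_in_law"
  else if (parent_in_law_types.map PySem.Str.lower).contains (PySem.Str.lower relationship) then "parent_in_law"
  else if (sibling_in_laws_types.map PySem.Str.lower).contains (PySem.Str.lower relationship) then "sibling_in_law"
  else if (adult_child_types.map PySem.Str.lower).contains (PySem.Str.lower relationship) then "adult_child"
  else if (minor_child_types.map PySem.Str.lower).contains (PySem.Str.lower relationship) then "minor_child"
  else PySem.Str.lower relationship

-- ===== PORT B =====
def relationship_category_pairs : List (List String × String) :=
  [(child_types, "child"),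
   (spouse_types, "spouse"),
   (father_types, "father"),
   (mother_types, "mother"),
   (grandparent_types, "grandparent"),
   (grandchildren_types, "grandchild"),
   (mother_in_law_types, "mother_in_law"),
   (father_in_law_types, "father_in_law"),
   (sister_in_law_types, "sister_in_law"),
   (brother_in_law_types, "brother_in_law"),
   (son_in_law_types, "son_in_law"),
   (daughter_in_law_types, "daughter_in_law"),
   (parent_in_law_types, "parent_in_law"),
   (sibling_in_laws_types, "sibling_in_law"),
   (adult_child_types, "adult_child"),
   (minor_child_types, "minor_child")]

def RELATIONSHIP_MAP : PySem.Dict String String :=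
  relationship_category_pairs.foldl
    (fun d p => p.1.foldl (fun d v => d.insert (PySem.Str.lower v) p.2) d)
    PySem.Dict.empty

def get_relationship_types_alt (relationship : String) : String :=
  (RELATIONSHIP_MAP.getD (PySem.Str.lower relationship) (PySem.Str.lower relationship))

-- ===== PRECONDITION & SPEC =====
def Spec_get_relationship_types (relationship : String) (out : String) : Prop := out = get_relationship_types_alt relationship
instance (relationship : String) (out : String) : Decidable (Spec_get_relationship_types relationship out) := by unfold Spec_get_relationship_types; infer_instance

-- ===== CLAIM (what is proved, stated in full; the proofs are below) =====
def Claim_equal_get_relationship_types : Prop := ∀ (relationship : String), Dom_get_relationship_types relationship → Spec_get_relationship_types relationship (get_relationship_types relationship)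

-- ===== LEMMAS AND PROOFS =====

-- the built dictionary as a literal association list
set_option maxRecDepth 8000 in
theorem RELATIONSHIP_MAP_lit : RELATIONSHIP_MAP = PySem.Dict.mk [("son", "child"), ("daughter", "child"), ("child", "child"), ("spouse", "spouse"), ("partner", "spouse"), ("wife", "spouse"), ("husband", "spouse"), ("father", "father"), ("step father", "father"), ("step-father", "father"), ("mother", "mother"), ("step mother", "mother"), ("step-mother", "mother"), ("grandparent", "grandparent"), ("grandfather", "grandparent"), ("grandmother", "grandparent"), ("grandchild", "grandchild"), ("granddaughter", "grandchild"), ("grandson", "grandchild"), ("mother in law", "mother_in_law"), ("mother_in_law", "mother_in_law"), ("mother-in-law", "mother_in_law"), ("mother in-law", "mother_in_law"), ("father in law", "father_in_law"), ("father_in_law", "father_in_law"), ("father-in-law", "father_in_law"), ("father in-law", "father_in_law"), ("sister in law", "sister_in_law"), ("sister in-law", "sister_in_law"), ("sister_in_law", "sister_in_law"), ("sister-in-law", "sister_in_law"), ("brother in law", "brother_in_law"), ("brother in-law", "brother_in_law"), ("brother_in_law", "brother_in_law"), ("brother-in-law", "brother_in_law"), ("son in law", "son_in_law"), ("son in-law",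 "son_in_law"), ("son-in-law", "son_in_law"), ("son_in_law", "son_in_law"), ("daughter in law", "daughter_in_law"), ("daughter in-law", "daughter_in_law"), ("daughter-in-law", "daughter_in_law"), ("daughter_in_law", "daughter_in_law"), ("parent in-law", "parent_in_law"), ("parent in law", "parent_in_law"), ("sibling in-law", "sibling_in_law"), ("sibling in law", "sibling_in_law"), ("adult child", "adult_child"), ("adult-child", "adult_child"), ("adult_child", "adult_child"), ("minor child", "minor_child"), ("minor-child", "minor_child"), ("minor_child", "minor_child")] := by decide

-- the two ports agree for every string (both depend only on relationship.lower())
set_option maxRecDepth 8000 in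
theorem ports_agree (relationship : String) :
    get_relationship_types relationship = get_relationship_types_alt relationship := by
  simp only [get_relationship_types, get_relationship_types_alt, RELATIONSHIP_MAP_lit]
  generalize PySem.Str.lower relationship = k
  have e0 : child_types.map PySem.Str.lower = (["son", "daughter", "child"] : List String) := by decide
  have e1 : spouse_types.map PySem.Str.lower = (["spouse", "partner", "wife", "husband"] : List String) := by decide
  have e2 : father_types.map PySem.Str.lower = (["father", "step father", "step-father"] : List String) := by decide
  have e3 : mother_types.map PySem.Str.lower = (["mother", "step mother", "step-mother"] : List String) := by decide
  have e4 : grandparent_types.map PySem.Str.lower = (["grandparent", "grandfather", "grandmother"] : List String) := by decide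
  have e5 : grandchildren_types.map PySem.Str.lower = (["grandchild", "granddaughter", "grandson"] : List String) := by decide
  have e6 : mother_in_law_types.map PySem.Str.lower = (["mother in law", "mother_in_law", "mother-in-law", "mother-in-law", "mother_in_law", "mother in-law"] : List String) := by decide
  have e7 : father_in_law_types.map PySem.Str.lower = (["father in law", "father_in_law", "father-in-law", "father-in-law", "father_in_law", "father in-law"] : List String) := by decide
  have e8 : sister_in_law_types.map PySem.Str.lower = (["sister in law", "sister in-law", "sister_in_law", "sister-in-law"] : List String) := by decide
  have e9 : brother_in_law_types.map PySem.Str.lower = (["brother in law", "brother in-law", "brother_in_law", "brother-in-law"] : List String) := by decide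
  have e10 : son_in_law_types.map PySem.Str.lower = (["son in law", "son in-law", "son-in-law", "son_in_law"] : List String) := by decide
  have e11 : daughter_in_law_types.map PySem.Str.lower = (["daughter in law", "daughter in-law", "daughter-in-law", "daughter_in_law"] : List String) := by decide
  have e12 : parent_in_law_types.map PySem.Str.lower = (["parent in-law", "parent in law"] : List String) := by decide
  have e13 : sibling_in_laws_types.map PySem.Str.lower = (["sibling in-law", "sibling in law"] : List String) := by decide
  have e14 : adult_child_types.map PySem.Str.lower = (["adult child", "adult-child", "adult_child"] : List String) := by decide
  have e15 : minor_child_types.map PySem.Str.lower = (["minor child", "minor-child", "minor_child"] : List String) := by decide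
  rw [e0, e1, e2, e3, e4, e5, e6, e7, e8, e9, e10, e11, e12, e13, e14, e15]
  by_cases h : k ∈ (["son", "daughter", "child", "spouse", "partner", "wife", "husband", "father", "step father", "step-father", "mother", "step mother", "step-mother", "grandparent", "grandfather", "grandmother", "grandchild", "granddaughter", "grandson", "mother in law", "mother_in_law", "mother-in-law", "mother in-law", "father in law", "father_in_law", "father-in-law", "father in-law", "sister in law", "sister in-law", "sister_in_law", "sister-in-law", "brother in law", "brother in-law", "brother_in_law", "brother-in-law", "son in law", "son in-law", "son-in-law", "son_in_law", "daughter in law", "daughter in-law", "daughter-in-law", "daughter_in_law", "parent in-law", "parent in law", "sibling in-law", "sibling in law", "adult child", "adult-child", "adult_child", "minor child", "minor-child", "minor_child"] : List String)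
  · simp only [List.mem_cons, List.not_mem_nil, or_false] at h
    rcases h with rfl|rfl|rfl|rfl|rfl|rfl|rfl|rfl|rfl|rfl|rfl|rfl|rfl|rfl|rfl|rfl|rfl|rfl|rfl|rfl|rfl|rfl|rfl|rfl|rfl|rfl|rfl|rfl|rfl|rfl|rfl|rfl|rfl|rfl|rfl|rfl|rfl|rfl|rfl|rfl|rfl|rfl|rfl|rfl|rfl|rfl|rfl|rfl|rfl|rfl|rfl|rfl|rfl
    · decide
    · decide
    · decide
    · decide
    · decide
    · decide
    · decide
    · decide
    · decide
    · decide
    · decide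
    · decide
    · decide
    · decide
    · decide
    · decide
    · decide
    · decide
    · decide
    · decide
    · decide
    · decide
    · decide
    · decide
    · decide
    · decide
    · decide
    · decide
    · decide
    · decide
    · decide
    · decide
    · decide
    · decide
    · decide
    · decide
    · decide
    · decide
    · decide
    · decide
    · decide
    · decide
    · decide
    · decide
    · decide
    · decide
    · decide
    · decide
    · decide
    · decide
    · decide
    · decide
    · decide
  · simp only [List.mem_cons, List.not_mem_nil, or_false, not_or] at h
    obtain ⟨h0, h1, h2, h3, h4, h5, h6, h7, h8, h9, h10, h11, h12, h13, h14, h15, h16, h17, h18, h19, h20, h21, h22, h23, h24, h25, h26, h27, h28, h29, h30, h31, h32, h33, h34, h35, h36, h37, h38, h39, h40, h41, h42, h43, h44, h45, h46, h47, h48, h49, h50, h51, h52⟩ := h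
    simp [PySem.Dict.getD_eq_get?_getD, PySem.Dict.get?_mk_cons, List.contains_eq_mem, h0, Ne.symm h0, h1, Ne.symm h1, h2, Ne.symm h2, h3, Ne.symm h3, h4, Ne.symm h4, h5, Ne.symm h5, h6, Ne.symm h6, h7, Ne.symm h7, h8, Ne.symm h8, h9, Ne.symm h9, h10, Ne.symm h10, h11, Ne.symm h11, h12, Ne.symm h12, h13, Ne.symm h13, h14, Ne.symm h14, h15, Ne.symm h15, h16, Ne.symm h16, h17, Ne.symm h17, h18, Ne.symm h18, h19, Ne.symm h19, h20, Ne.symm h20, h21, Ne.symm h21, h22, Ne.symm h22, h23, Ne.symm h23, h24, Ne.symm h24, h25, Ne.symm h25, h26, Ne.symm h26, h27, Ne.symm h27, h28, Ne.symm h28, h29, Ne.symm h29, h30, Ne.symm h30, h31, Ne.symm h31, h32, Ne.symm h32, h33, Ne.symm h33, h34, Ne.symm h34, h35, Ne.symm h35, h36, Ne.symm h36, h37, Ne.symm h37, h38, Ne.symm h38, h39, Ne.symm h39, h40, Ne.symm h40, h41, Ne.symm h41, h42, Ne.symm h42, h43, Ne.symm h43, h44, Ne.symm h44, h45, Ne.symm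 h45, h46, Ne.symm h46, h47, Ne.symm h47, h48, Ne.symm h48, h49, Ne.symm h49, h50, Ne.symm h50, h51, Ne.symm h51, h52, Ne.symm h52]
    rfl

-- ===== VERDICT (by name: the statement is the Claim_ definition above) =====
theorem get_relationship_types_spec : Claim_equal_get_relationship_types := by
  intro relationship _
  unfold Spec_get_relationship_types
  exact ports_agree relationship
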